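-- pv_equiv track=rewrite | github.com/Humayraacreative/bot-capstone-project | BoTProjectPro3.py | find_column_name
-- ===== SOURCE A (Python) =====
-- def find_column_name(columns, keywords):
--     sorted_cols = sorted(columns, key=len, reverse=True)
--     for col in sorted_cols:
--         col_lower = col.lower()
--         if 'date' in col_lower or 'time' in col_lower:
--             continue
--         if any(k in col_lower for k in keywords):
--             return col
--     return None
-- ===== SOURCE B (Python) =====
-- def find_column_name(columns, keywords):
--     best_col = None
--     best_len = -1
--     for col in columns:
--         if len(col) > best_len:
--             col_lower = col.lower()
--             if 'date' in col_lower or 'time' in col_lower: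
--                 continue
--             if any(k in col_lower for k in keywords):
--                 best_col = col
--                 best_len = len(col)
--     return best_col
-- ===== Notes on version B (the rewrite author's own statement) =====
-- stated objective: alternative
-- what changed: Replaced the stable length-descending sort followed by a first-match scan with a single pass in original column order keeping the best (longest; earliest on ties via strict >) matching non-date column, with a length gate that skips the string tests for columns not longer than the current best.
import Mathlib
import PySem

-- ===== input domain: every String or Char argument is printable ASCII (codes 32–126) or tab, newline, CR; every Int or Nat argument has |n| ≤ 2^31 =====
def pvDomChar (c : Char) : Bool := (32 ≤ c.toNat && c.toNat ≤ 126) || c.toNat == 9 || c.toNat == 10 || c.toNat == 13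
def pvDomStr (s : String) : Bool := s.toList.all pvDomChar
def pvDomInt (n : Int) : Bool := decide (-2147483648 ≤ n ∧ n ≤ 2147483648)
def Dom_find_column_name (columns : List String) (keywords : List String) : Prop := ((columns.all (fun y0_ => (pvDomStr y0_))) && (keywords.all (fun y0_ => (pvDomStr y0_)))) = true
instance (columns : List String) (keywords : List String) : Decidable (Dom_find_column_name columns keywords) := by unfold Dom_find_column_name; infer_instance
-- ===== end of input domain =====

-- B replaces A's stable length-descending sort + first-match scan by a single original-order
-- pass keeping the best (longest; earliest on ties via strict >) matching non-date column.

-- ===== PORT A =====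
-- the 'for col in sorted_cols' loop of A, with 'continue' as recursion on the tail
def pvLoopA (keywords : List String) : List String → Option String
  | [] => none
  | col :: rest =>
    let col_lower := PySem.Str.lower col
    if PySem.Str.isIn "date" col_lower || PySem.Str.isIn "time" col_lower then
      pvLoopA keywords rest
    else if keywords.any (fun k => PySem.Str.isIn k col_lower) then some col
    else pvLoopA keywords rest

def find_column_name (columns : List String) (keywords : List String) : Option String :=
  let sorted_cols := PySem.List.sorted columns (fun c => PySem.Str.len c) true
  pvLoopA keywords sorted_cols

-- ===== PORT B =====
-- one step of B's loop over the original column order, state = (best_col, best_len);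
-- the length gate 'len(col) > best_len' is checked before the string tests
def pvStepB (keywords : List String) (st : Option String × Int) (col : String) :
    Option String × Int :=
  if st.2 < PySem.Str.len col then
    let col_lower := PySem.Str.lower col
    if PySem.Str.isIn "date" col_lower || PySem.Str.isIn "time" col_lower then st
    else if keywords.any (fun k => PySem.Str.isIn k col_lower) then (some col, PySem.Str.len col)
    else st
  else st

def find_column_name_alt (columns : List String) (keywords : List String) : Option String :=
  (columns.foldl (pvStepB keywords) (none, -1)).1

-- ===== PRECONDITION & SPEC =====
def Spec_find_column_name (columns : List String) (keywords : List String) (out : Option String) : Prop := out = find_column_name_alt columns keywords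
instance (columns : List String) (keywords : List String) (out : Option String) : Decidable (Spec_find_column_name columns keywords out) := by unfold Spec_find_column_name; infer_instance

-- ===== CLAIM (what is proved, stated in full; the proofs are below) =====
def Claim_equal_find_column_name : Prop := ∀ (columns : List String) (keywords : List String), Dom_find_column_name columns keywords → Spec_find_column_name columns keywords (find_column_name columns keywords)

-- ===== LEMMAS AND PROOFS =====

-- the shared filter predicate: non-date/time column matching some keyword
def pvP (keywords : List String) (c : String) : Bool :=
  !(PySem.Str.isIn "date" (PySem.Str.lower c) || PySem.Str.isIn "time" (PySem.Str.lower c)) &&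
    keywords.any (fun k => PySem.Str.isIn k (PySem.Str.lower c))

-- descending-by-length "insert before" relation used by sorted(..., reverse=True)
def pvBef (a b : String) : Bool := decide (PySem.Str.len b < PySem.Str.len a)

-- the length-comparison step of B restricted to matching columns
def pvStepC (st : Option String × Int) (col : String) : Option String × Int :=
  if st.2 < PySem.Str.len col then (some col, PySem.Str.len col) else st

theorem pvLoopA_eq_find? (keywords : List String) (xs : List String) :
    pvLoopA keywords xs = xs.find? (pvP keywords) := by
  induction xs with
  | nil => rfl
  | cons c t ih =>
    simp only [pvLoopA, List.find?, pvP]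
    cases hdt : (PySem.Str.isIn "date" (PySem.Str.lower c) ||
        PySem.Str.isIn "time" (PySem.Str.lower c)) with
    | true => simp [ih]
    | false =>
      cases hany : (keywords.any fun k => PySem.Str.isIn k (PySem.Str.lower c)) with
      | true => simp
      | false => simp [ih]

theorem pvLen_nonneg (s : String) : 0 ≤ PySem.Str.len s := by
  simp [PySem.Str.len_eq]

theorem pvSorted_concat (xs : List String) (x : String) :
    PySem.List.sorted (xs ++ [x]) (fun c => PySem.Str.len c) true =
      PySem.List.insertBy pvBef x (PySem.List.sorted xs (fun c => PySem.Str.len c) true) := by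
  rw [PySem.List.sorted_rev_eq_foldl_insertBy, PySem.List.sorted_rev_eq_foldl_insertBy,
    List.foldl_append]
  rfl

theorem pvInsertBy_all_before (x : String) (L : List String)
    (h : ∀ z ∈ L, pvBef x z = true) : PySem.List.insertBy pvBef x L = x :: L := by
  cases L with
  | nil => rfl
  | cons y ys => simp [PySem.List.insertBy, h y (by simp)]

theorem pvFilter_insertBy (q : String → Bool) (x : String) (L : List String)
    (hs : L.Pairwise (fun a b => PySem.Str.len b ≤ PySem.Str.len a)) :
    (PySem.List.insertBy pvBef x L).filter q =
      if q x then PySem.List.insertBy pvBef x (L.filter q) else L.filter q := by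
  induction L with
  | nil =>
    by_cases hq : q x = true <;> simp [PySem.List.insertBy, List.filter, hq]
  | cons y ys ih =>
    have hp := List.pairwise_cons.mp hs
    by_cases hb : pvBef x y = true
    · rw [show PySem.List.insertBy pvBef x (y :: ys) = x :: y :: ys from by
        simp [PySem.List.insertBy, hb]]
      by_cases hq : q x = true
      · have hall : ∀ z ∈ (y :: ys).filter q, pvBef x z = true := by
          intro z hz
          have hz' := List.mem_of_mem_filter hz
          rcases List.mem_cons.mp hz' with rfl | hz2
          · exact hb
          · have hle := hp.1 z hz2
            simp only [pvBef, decide_eq_true_eq] at hb ⊢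
            omega
        rw [if_pos hq, pvInsertBy_all_before x _ hall]
        simp [List.filter_cons, hq]
      · simp [List.filter_cons, hq]
    · rw [show PySem.List.insertBy pvBef x (y :: ys) = y :: PySem.List.insertBy pvBef x ys from by
        simp [PySem.List.insertBy, hb]]
      by_cases hqy : q y = true
      · by_cases hq : q x = true
        · simp [hqy, hq, ih hp.2, PySem.List.insertBy, hb]
        · simp [hqy, hq, ih hp.2]
      · by_cases hq : q x = true
        · simp [hqy, hq, ih hp.2]
        · simp [hqy, hq, ih hp.2]

theorem pvFilter_sorted (q : String → Bool) (xs : List String) :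
    (PySem.List.sorted xs (fun c => PySem.Str.len c) true).filter q =
      PySem.List.sorted (xs.filter q) (fun c => PySem.Str.len c) true := by
  induction xs using List.reverseRecOn with
  | nil => simp [PySem.List.sorted]
  | append_singleton xs x ih =>
    rw [pvSorted_concat,
      pvFilter_insertBy q x _ (PySem.List.sorted_pairwise_rev xs (fun c => PySem.Str.len c)),
      ih, List.filter_append]
    by_cases hq : q x = true
    · rw [if_pos hq, show List.filter q [x] = [x] from by simp [hq], pvSorted_concat]
    · simp [hq]

theorem pvStepB_eq (keywords : List String) (st : Option String × Int) (c : String) :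
    pvStepB keywords st c = if pvP keywords c = true then pvStepC st c else st := by
  simp only [pvStepB, pvStepC, pvP]
  by_cases hlt : st.2 < PySem.Str.len c
  · simp only [if_pos hlt]
    rcases (PySem.Str.isIn "date" (PySem.Str.lower c) ||
        PySem.Str.isIn "time" (PySem.Str.lower c)).eq_false_or_eq_true with hdt | hdt
    · simp only [hdt]
      simp
    · simp only [hdt]
      rcases (keywords.any fun k => PySem.Str.isIn k (PySem.Str.lower c)).eq_false_or_eq_true
        with hany | hany
      · simp only [hany]
        simp
      · simp only [hany]
        simp
  · simp only [if_neg hlt]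
    rcases (PySem.Str.isIn "date" (PySem.Str.lower c) ||
        PySem.Str.isIn "time" (PySem.Str.lower c)).eq_false_or_eq_true with hdt | hdt
    · simp only [hdt]
      simp
    · simp only [hdt]
      rcases (keywords.any fun k => PySem.Str.isIn k (PySem.Str.lower c)).eq_false_or_eq_true
        with hany | hany
      · simp only [hany]
        simp
      · simp only [hany]
        simp

theorem pvFoldB_eq_foldC (keywords : List String) (xs : List String) :
    ∀ st, xs.foldl (pvStepB keywords) st = (xs.filter (pvP keywords)).foldl pvStepC st := by
  induction xs with
  | nil => intro st; rfl
  | cons c t ih =>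
    intro st
    simp only [List.foldl_cons, List.filter_cons, pvStepB_eq]
    rcases (pvP keywords c).eq_false_or_eq_true with h | h
    · simp [h, ih]
    · simp [h, ih]

-- the single-pass state is exactly (head, len head) of the stable descending sort so far
def pvRel (S : List String) (st : Option String × Int) : Prop :=
  st = match S with
  | [] => (none, -1)
  | h :: _ => (some h, PySem.Str.len h)

theorem pvFoldC_rel (ys : List String) :
    pvRel (PySem.List.sorted ys (fun c => PySem.Str.len c) true) (ys.foldl pvStepC (none, -1)) := by
  induction ys using List.reverseRecOn with
  | nil => simp [PySem.List.sorted, pvRel]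
  | append_singleton ys y ih =>
    rw [pvSorted_concat, List.foldl_append]
    simp only [List.foldl]
    cases hS : PySem.List.sorted ys (fun c => PySem.Str.len c) true with
    | nil =>
      rw [hS] at ih
      simp only [pvRel] at ih
      rw [ih]
      show pvRel (PySem.List.insertBy pvBef y []) (pvStepC (none, -1) y)
      have hpos : (-1 : Int) < PySem.Str.len y :=
        lt_of_lt_of_le (by norm_num) (pvLen_nonneg y)
      simp only [pvStepC]
      rw [if_pos hpos]
      simp [PySem.List.insertBy, pvRel]
    | cons h t =>
      rw [hS] at ih
      simp only [pvRel] at ih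
      rw [ih]
      by_cases hb : PySem.Str.len h < PySem.Str.len y
      · have hbt : pvBef y h = true := decide_eq_true hb
        rw [show PySem.List.insertBy pvBef y (h :: t) = y :: h :: t from by
          simp [PySem.List.insertBy, hbt]]
        show pvRel (y :: h :: t) (pvStepC (some h, PySem.Str.len h) y)
        simp only [pvStepC]
        rw [if_pos hb]
        simp [pvRel]
      · have hbf : pvBef y h = false := decide_eq_false hb
        rw [show PySem.List.insertBy pvBef y (h :: t) =
            h :: PySem.List.insertBy pvBef y t from by
          simp [PySem.List.insertBy, hbf]]
        show pvRel (h :: PySem.List.insertBy pvBef y t) (pvStepC (some h, PySem.Str.len h) y)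
        simp only [pvStepC]
        rw [if_neg hb]
        simp [pvRel]

-- ===== VERDICT (by name: the statement is the Claim_ definition above) =====
theorem find_column_name_spec : Claim_equal_find_column_name := by
  intro columns keywords _
  unfold Spec_find_column_name
  unfold find_column_name find_column_name_alt
  rw [pvLoopA_eq_find?, ← List.head?_filter, pvFilter_sorted, pvFoldB_eq_foldC]
  have h := pvFoldC_rel (columns.filter (pvP keywords))
  cases hS : PySem.List.sorted (columns.filter (pvP keywords)) (fun c => PySem.Str.len c) true with
  | nil => rw [hS] at h; simp only [pvRel] at h; rw [h]; rfl
  | cons a t => rw [hS] at h; simp only [pvRel] at h; rw [h]; rfl
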